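-- pv_equiv track=rewrite | github.com/Shishtakrita/leetcode | BackTracking/canBalance.py | canBalance
-- ===== SOURCE A (Python) =====
-- from typing import List
--
-- def canBalance(target: int, weights: List[int]) -> bool:
--     def helper(leftWeight: int, rightWeight: int, availableWeights: List[int]):
--         if leftWeight + rightWeight == 0:
--             return True
--         elif not availableWeights:
--             return False
--         else:
--             for i in range(len(availableWeights)):
--                 currentWeight = availableWeights[i]
--                 availableWeights.pop(i)
--                 if helper(leftWeight, rightWeight + currentWeight, availableWeights):
--                     return True
--                 if helper(leftWeight - currentWeight, rightWeight, availableWeights):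
--                     return True
--                 availableWeights.insert(i, currentWeight)
--             return False
--
--     return helper(-target, 0, weights)
-- ===== SOURCE B (Python) =====
-- def canBalance(target, weights):
--     sums = {0}
--     for w in weights:
--         sums |= {s + w for s in sums} | {s - w for s in sums}
--     return target in sums
-- ===== Notes on version B (the rewrite author's own statement) =====
-- stated objective: faster
-- what changed: Replaced the exponential backtracking recursion (which tries every removal order with + and - signs) by a single left-to-right pass maintaining the set of reachable signed sums (subset-sum DP), then a membership test.
import Mathlib
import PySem

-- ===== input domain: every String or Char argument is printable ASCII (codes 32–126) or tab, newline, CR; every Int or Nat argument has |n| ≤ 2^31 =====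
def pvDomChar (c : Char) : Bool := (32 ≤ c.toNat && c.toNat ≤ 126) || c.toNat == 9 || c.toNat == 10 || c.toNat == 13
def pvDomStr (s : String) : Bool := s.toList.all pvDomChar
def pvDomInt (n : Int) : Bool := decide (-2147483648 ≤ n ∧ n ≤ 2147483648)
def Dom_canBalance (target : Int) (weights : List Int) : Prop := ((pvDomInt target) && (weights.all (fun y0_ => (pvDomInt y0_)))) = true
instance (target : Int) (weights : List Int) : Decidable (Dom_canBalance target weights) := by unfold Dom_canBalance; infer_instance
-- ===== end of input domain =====

-- B replaces A's exponential backtracking by a one-pass reachable-sum-set DP (subset-sum style);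
-- equivalence is about the RETURN value only: Python A mutates `weights` in place on inputs where it returns True.

-- ===== PORT A =====
-- helper(leftWeight, rightWeight, availableWeights); A's pop(i)/insert(i,·) pair restores the list
-- on every failing iteration, so each recursive call sees exactly availableWeights with index i removed.
-- `fuel` only bounds the recursion depth (each call strictly shrinks the list); fuel = length suffices.
def canBalanceHelper : Nat → Int → Int → List Int → Bool
  | fuel, leftWeight, rightWeight, avail =>
    if leftWeight + rightWeight = 0 then true
    else if avail.isEmpty then false
    else match fuel with
      | 0 => false
      | fuel + 1 =>
        (List.range avail.length).any (fun i =>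
          let currentWeight := avail.getD i 0       -- availableWeights[i]; i < len so exact
          let rest := avail.eraseIdx i              -- availableWeights.pop(i)
          canBalanceHelper fuel leftWeight (rightWeight + currentWeight) rest ||
          canBalanceHelper fuel (leftWeight - currentWeight) rightWeight rest)

def canBalance (target : Int) (weights : List Int) : Bool :=
  canBalanceHelper weights.length (-target) 0 weights

-- ===== PORT B =====
-- sums = {0}; for w in weights: sums |= {s+w for s in sums} | {s-w for s in sums}; return target in sums
def canBalanceStep (sums : PySem.Set Int) (w : Int) : PySem.Set Int :=
  PySem.Set.union sums
    (PySem.Set.union (PySem.Set.ofList (sums.map (fun s => s + w)))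
                     (PySem.Set.ofList (sums.map (fun s => s - w))))

def canBalance_alt (target : Int) (weights : List Int) : Bool :=
  PySem.Set.contains (weights.foldl canBalanceStep (PySem.Set.ofList [0])) target

-- ===== PRECONDITION & SPEC =====
def Spec_canBalance (target : Int) (weights : List Int) (out : Bool) : Prop := out = canBalance_alt target weights
instance (target : Int) (weights : List Int) (out : Bool) : Decidable (Spec_canBalance target weights out) := by unfold Spec_canBalance; infer_instance

-- ===== CLAIM (what is proved, stated in full; the proofs are below) =====
def Claim_equal_canBalance : Prop := ∀ (target : Int) (weights : List Int), Dom_canBalance target weights → Spec_canBalance target weights (canBalance target weights)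

-- ===== LEMMAS AND PROOFS =====

-- `Sel ws s`: s is a signed sum of some sub-multiset of ws (each weight used with sign +, sign -, or skipped).
inductive Sel : List Int → Int → Prop
  | nil : Sel [] 0
  | skip {ws s w} : Sel ws s → Sel (w :: ws) s
  | pos {ws s w} : Sel ws s → Sel (w :: ws) (s + w)
  | neg {ws s w} : Sel ws s → Sel (w :: ws) (s - w)

theorem Sel_zero : ∀ (ws : List Int), Sel ws 0
  | [] => Sel.nil
  | _ :: ws => Sel.skip (Sel_zero ws)

theorem Sel_nil_iff (s : Int) : Sel [] s ↔ s = 0 := by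
  constructor
  · intro h; cases h; rfl
  · rintro rfl; exact Sel.nil

theorem Sel_cons_iff (w : Int) (ws : List Int) (s : Int) :
    Sel (w :: ws) s ↔ Sel ws s ∨ Sel ws (s - w) ∨ Sel ws (s + w) := by
  constructor
  · intro h
    cases h with
    | skip h => exact Or.inl h
    | pos h => exact Or.inr (Or.inl (by simpa using h))
    | neg h => exact Or.inr (Or.inr (by simpa using h))
  · rintro (h | h | h)
    · exact Sel.skip h
    · have := Sel.pos (w := w) h; simpa using this
    · have := Sel.neg (w := w) h; simpa using this

-- Lifting a selection over ws.eraseIdx i back to ws, using element ws[i] positively / negatively.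
theorem Sel_eraseIdx_pos : ∀ (ws : List Int) (i : Nat) (s : Int), i < ws.length →
    Sel (ws.eraseIdx i) s → Sel ws (s + ws.getD i 0)
  | [], i, s, hi, _ => absurd hi (by simp)
  | w :: ws, 0, s, _, h => by
    rw [List.eraseIdx_cons_zero] at h
    rw [List.getD_cons_zero]
    exact Sel.pos h
  | w :: ws, i + 1, s, hi, h => by
    rw [List.eraseIdx_cons_succ] at h
    rw [List.getD_cons_succ]
    have hi' : i < ws.length := by simpa using hi
    rcases (Sel_cons_iff w _ s).mp h with h' | h' | h'
    · exact Sel.skip (Sel_eraseIdx_pos ws i s hi' h')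
    · have h2 := Sel.pos (w := w) (Sel_eraseIdx_pos ws i (s - w) hi' h')
      have e : s - w + ws.getD i 0 + w = s + ws.getD i 0 := by ring
      rwa [e] at h2
    · have h2 := Sel.neg (w := w) (Sel_eraseIdx_pos ws i (s + w) hi' h')
      have e : s + w + ws.getD i 0 - w = s + ws.getD i 0 := by ring
      rwa [e] at h2

theorem Sel_eraseIdx_neg : ∀ (ws : List Int) (i : Nat) (s : Int), i < ws.length →
    Sel (ws.eraseIdx i) s → Sel ws (s - ws.getD i 0)
  | [], i, s, hi, _ => absurd hi (by simp)
  | w :: ws, 0, s, _, h => by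
    rw [List.eraseIdx_cons_zero] at h
    rw [List.getD_cons_zero]
    exact Sel.neg h
  | w :: ws, i + 1, s, hi, h => by
    rw [List.eraseIdx_cons_succ] at h
    rw [List.getD_cons_succ]
    have hi' : i < ws.length := by simpa using hi
    rcases (Sel_cons_iff w _ s).mp h with h' | h' | h'
    · exact Sel.skip (Sel_eraseIdx_neg ws i s hi' h')
    · have h2 := Sel.pos (w := w) (Sel_eraseIdx_neg ws i (s - w) hi' h')
      have e : s - w - ws.getD i 0 + w = s - ws.getD i 0 := by ring
      rwa [e] at h2
    · have h2 := Sel.neg (w := w) (Sel_eraseIdx_neg ws i (s + w) hi' h')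
      have e : s + w - ws.getD i 0 - w = s - ws.getD i 0 := by ring
      rwa [e] at h2

-- A nonzero selection must actually use some element, which can be removed first.
theorem Sel_exists_erase {ws : List Int} {s : Int} (h : Sel ws s) (hs : s ≠ 0) :
    ∃ i, i < ws.length ∧
      (Sel (ws.eraseIdx i) (s - ws.getD i 0) ∨ Sel (ws.eraseIdx i) (s + ws.getD i 0)) := by
  induction h with
  | nil => exact absurd rfl hs
  | @skip ws s w h ih =>
    obtain ⟨i, hi, hsel⟩ := ih hs
    refine ⟨i + 1, by simpa using hi, ?_⟩
    rw [List.eraseIdx_cons_succ, List.getD_cons_succ]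
    exact hsel.imp Sel.skip Sel.skip
  | @pos ws s w h =>
    refine ⟨0, by simp, Or.inl ?_⟩
    rw [List.eraseIdx_cons_zero, List.getD_cons_zero]
    have e : s + w - w = s := by ring
    rw [e]; exact h
  | @neg ws s w h =>
    refine ⟨0, by simp, Or.inr ?_⟩
    rw [List.eraseIdx_cons_zero, List.getD_cons_zero]
    have e : s - w + w = s := by ring
    rw [e]; exact h

theorem helper_complete : ∀ (fuel : Nat) (l r : Int) (avail : List Int),
    avail.length ≤ fuel → Sel avail (-(l + r)) → canBalanceHelper fuel l r avail = true := by
  intro fuel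
  induction fuel with
  | zero =>
    intro l r avail hlen hsel
    have : avail = [] := List.length_eq_zero_iff.mp (Nat.le_zero.mp hlen)
    subst this
    have : l + r = 0 := by have := (Sel_nil_iff _).mp hsel; omega
    simp [canBalanceHelper, this]
  | succ fuel ih =>
    intro l r avail hlen hsel
    by_cases hz : l + r = 0
    · simp [canBalanceHelper, hz]
    · have hs : -(l + r) ≠ 0 := by omega
      obtain ⟨i, hi, hsel'⟩ := Sel_exists_erase hsel hs
      have hne : avail ≠ [] := by
        intro h; subst h; simp at hi
      have hlen' : (avail.eraseIdx i).length ≤ fuel := by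
        rw [List.length_eraseIdx_of_lt hi]; omega
      rw [canBalanceHelper]
      simp only [hz, if_false, List.isEmpty_iff, hne, if_false, List.any_eq_true]
      refine ⟨i, List.mem_range.mpr hi, ?_⟩
      simp only [Bool.or_eq_true]
      rcases hsel' with h' | h'
      · left
        exact ih l (r + avail.getD i 0) _ hlen' (by
          have e : -(l + (r + avail.getD i 0)) = -(l + r) - avail.getD i 0 := by ring
          rw [e]; exact h')
      · right
        exact ih (l - avail.getD i 0) r _ hlen' (by
          have e : -(l - avail.getD i 0 + r) = -(l + r) + avail.getD i 0 := by ring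
          rw [e]; exact h')

theorem helper_sound : ∀ (fuel : Nat) (l r : Int) (avail : List Int),
    canBalanceHelper fuel l r avail = true → Sel avail (-(l + r)) := by
  intro fuel
  induction fuel with
  | zero =>
    intro l r avail h
    rw [canBalanceHelper] at h
    by_cases hz : l + r = 0
    · have : -(l + r) = 0 := by omega
      rw [this]; exact Sel_zero avail
    · simp [hz] at h
  | succ fuel ih =>
    intro l r avail h
    by_cases hz : l + r = 0
    · have e : -(l + r) = 0 := by omega
      rw [e]; exact Sel_zero avail
    · by_cases he : avail.isEmpty = true
      · rw [canBalanceHelper] at h; simp [hz, he] at h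
      · rw [canBalanceHelper] at h
        simp [hz, he] at h
        obtain ⟨i, hi, hc | hc⟩ := h
        · have hsel := Sel_eraseIdx_pos avail i _ hi (ih _ _ _ hc)
          rw [List.getD_eq_getElem?_getD] at hsel
          have e : -(l + (r + avail[i]?.getD 0)) + avail[i]?.getD 0 = -(l + r) := by ring
          rwa [e] at hsel
        · have hsel := Sel_eraseIdx_neg avail i _ hi (ih _ _ _ hc)
          rw [List.getD_eq_getElem?_getD] at hsel
          have e : -(l - avail[i]?.getD 0 + r) - avail[i]?.getD 0 = -(l + r) := by ring
          rwa [e] at hsel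

theorem canBalance_iff_Sel (target : Int) (weights : List Int) :
    canBalance target weights = true ↔ Sel weights target := by
  unfold canBalance
  constructor
  · intro h
    have := helper_sound weights.length (-target) 0 weights h
    simpa using this
  · intro h
    exact helper_complete weights.length (-target) 0 weights le_rfl (by simpa using h)

-- B side: membership in the folded reachable-sum set.
theorem mem_canBalanceStep (sums : PySem.Set Int) (w t : Int) :
    t ∈ canBalanceStep sums w ↔ t ∈ sums ∨ (∃ s ∈ sums, t = s + w) ∨ (∃ s ∈ sums, t = s - w) := by
  unfold canBalanceStep
  simp only [PySem.Set.mem_union, PySem.Set.mem_ofList, List.mem_map]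
  constructor
  · rintro (h | ⟨s, hs, rfl⟩ | ⟨s, hs, rfl⟩)
    · exact Or.inl h
    · exact Or.inr (Or.inl ⟨s, hs, rfl⟩)
    · exact Or.inr (Or.inr ⟨s, hs, rfl⟩)
  · rintro (h | ⟨s, hs, rfl⟩ | ⟨s, hs, rfl⟩)
    · exact Or.inl h
    · exact Or.inr (Or.inl ⟨s, hs, rfl⟩)
    · exact Or.inr (Or.inr ⟨s, hs, rfl⟩)

theorem mem_foldl_canBalanceStep : ∀ (ws : List Int) (acc : PySem.Set Int) (t : Int),
    t ∈ ws.foldl canBalanceStep acc ↔ ∃ s ∈ acc, Sel ws (t - s) := by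
  intro ws
  induction ws with
  | nil =>
    intro acc t
    simp only [List.foldl_nil, Sel_nil_iff]
    constructor
    · intro h; exact ⟨t, h, by ring⟩
    · rintro ⟨s, hs, he⟩
      have : t = s := by omega
      rwa [this]
  | cons w ws ih =>
    intro acc t
    rw [List.foldl_cons, ih]
    constructor
    · rintro ⟨s, hs, hsel⟩
      rw [mem_canBalanceStep] at hs
      rcases hs with h | ⟨s', hs', rfl⟩ | ⟨s', hs', rfl⟩
      · exact ⟨s, h, Sel.skip hsel⟩
      · refine ⟨s', hs', ?_⟩
        have := Sel.pos (w := w) hsel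
        have e : t - (s' + w) + w = t - s' := by ring
        rwa [e] at this
      · refine ⟨s', hs', ?_⟩
        have := Sel.neg (w := w) hsel
        have e : t - (s' - w) - w = t - s' := by ring
        rwa [e] at this
    · rintro ⟨s, hs, hsel⟩
      rcases (Sel_cons_iff w ws (t - s)).mp hsel with h | h | h
      · exact ⟨s, (mem_canBalanceStep acc w s).mpr (Or.inl hs), h⟩
      · refine ⟨s + w, (mem_canBalanceStep acc w (s + w)).mpr (Or.inr (Or.inl ⟨s, hs, rfl⟩)), ?_⟩
        have e : t - (s + w) = t - s - w := by ring
        rwa [e]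
      · refine ⟨s - w, (mem_canBalanceStep acc w (s - w)).mpr (Or.inr (Or.inr ⟨s, hs, rfl⟩)), ?_⟩
        have e : t - (s - w) = t - s + w := by ring
        rwa [e]

theorem canBalance_alt_iff_Sel (target : Int) (weights : List Int) :
    canBalance_alt target weights = true ↔ Sel weights target := by
  unfold canBalance_alt
  rw [PySem.Set.contains_iff, mem_foldl_canBalanceStep]
  constructor
  · rintro ⟨s, hs, hsel⟩
    have : s = 0 := by simpa [PySem.Set.ofList] using hs
    subst this; simpa using hsel
  · intro h
    exact ⟨0, by simp [PySem.Set.ofList], by simpa using h⟩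

-- ===== VERDICT (by name: the statement is the Claim_ definition above) =====
theorem canBalance_spec : Claim_equal_canBalance := by
  intro target weights _
  unfold Spec_canBalance
  rw [Bool.eq_iff_iff, canBalance_iff_Sel, canBalance_alt_iff_Sel]
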